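-- pv_equiv track=rewrite | github.com/Elran04/_MAGUS_RPG | MAGUS_pygame/infrastructure/rendering/hex_grid.py | hexes_in_range
-- ===== SOURCE A (Python) =====
-- def hexes_in_range(q0: int, r0: int, rng: int) -> set[tuple[int, int]]:
--     """Return a set of axial hexes within range from (q0, r0).
--
--     Args:
--         q0, r0: Center hex coordinates
--         rng: Range radius
--
--     Returns:
--         Set of (q, r) tuples within range
--     """
--     result = set()
--     for dq in range(-rng, rng + 1):
--         dr_min = max(-rng, -dq - rng)
--         dr_max = min(rng, -dq + rng)
--         for dr in range(dr_min, dr_max + 1):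
--             result.add((q0 + dq, r0 + dr))
--     return result
-- ===== SOURCE B (Python) =====
-- def hexes_in_range(q0: int, r0: int, rng: int) -> set[tuple[int, int]]:
--     """Return a set of axial hexes within range from (q0, r0).
--
--     Comprehension pipeline: build the list of in-range (dq, dr) deltas by
--     filtering the full bounding square with the axial hex-distance test,
--     then translate to the center and collect into a set in one step.
--     """
--     deltas = [(dq, dr)
--               for dq in range(-rng, rng + 1)
--               for dr in range(-rng, rng + 1)
--               if abs(dq) + abs(dr) + abs(dq + dr) <= 2 * rng]
--     return {(q0 + dq, r0 + dr) for (dq, dr) in deltas}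
-- ===== Notes on version B (the rewrite author's own statement) =====
-- stated objective: idiomatic
-- what changed: B is a comprehension pipeline: it filters the full bounding square by the axial hex-distance predicate abs(dq)+abs(dr)+abs(dq+dr) <= 2*rng to get a flat delta list, then translates and collects into a set in one final step, instead of A's nested loops with precomputed tight per-column dr bounds and incremental set.add.
import Mathlib
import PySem

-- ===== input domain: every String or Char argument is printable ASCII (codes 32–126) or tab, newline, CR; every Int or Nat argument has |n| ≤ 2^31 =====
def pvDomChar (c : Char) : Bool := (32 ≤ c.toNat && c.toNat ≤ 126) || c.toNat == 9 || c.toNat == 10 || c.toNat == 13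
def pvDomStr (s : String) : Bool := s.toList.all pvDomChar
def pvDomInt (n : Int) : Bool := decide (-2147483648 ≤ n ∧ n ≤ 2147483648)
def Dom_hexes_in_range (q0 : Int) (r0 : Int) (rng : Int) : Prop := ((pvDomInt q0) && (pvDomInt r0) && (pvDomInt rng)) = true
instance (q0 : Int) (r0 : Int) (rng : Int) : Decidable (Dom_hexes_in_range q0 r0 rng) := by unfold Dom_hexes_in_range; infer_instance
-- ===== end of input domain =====

-- B replaces A's nested loops with tight per-column bounds and incremental set.add by a
-- comprehension pipeline: filter the bounding square with the hex-distance test, then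
-- translate and collect into a set in one final step (idiomatic; same cost).
-- ===== PORT A =====
def hexes_in_range (q0 : Int) (r0 : Int) (rng : Int) : List (Int × Int) :=
  (PySem.List.pyRange (-rng) (rng + 1) 1).foldl (fun result dq =>
    let dr_min := max (-rng) (-dq - rng)
    let dr_max := min rng (-dq + rng)
    (PySem.List.pyRange dr_min (dr_max + 1) 1).foldl
      (fun result dr => PySem.Set.add result (q0 + dq, r0 + dr)) result)
    PySem.Set.empty

-- ===== PORT B =====
def hexes_in_range_alt (q0 : Int) (r0 : Int) (rng : Int) : List (Int × Int) :=
  let square := PySem.List.pyRange (-rng) (rng + 1) 1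
  let deltas := square.flatMap (fun dq =>
    (square.filter (fun dr => decide (|dq| + |dr| + |dq + dr| ≤ 2 * rng))).map
      (fun dr => (dq, dr)))
  PySem.Set.ofList (deltas.map (fun p => (q0 + p.1, r0 + p.2)))

-- ===== PRECONDITION & SPEC =====
def Spec_hexes_in_range (q0 : Int) (r0 : Int) (rng : Int) (out : List (Int × Int)) : Prop := out = hexes_in_range_alt q0 r0 rng
instance (q0 : Int) (r0 : Int) (rng : Int) (out : List (Int × Int)) : Decidable (Spec_hexes_in_range q0 r0 rng out) := by unfold Spec_hexes_in_range; infer_instance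

-- ===== CLAIM (what is proved, stated in full; the proofs are below) =====
def Claim_equal_hexes_in_range : Prop := ∀ (q0 : Int) (r0 : Int) (rng : Int), Dom_hexes_in_range q0 r0 rng → Spec_hexes_in_range q0 r0 rng (hexes_in_range q0 r0 rng)

-- ===== LEMMAS AND PROOFS =====

-- B's hex-distance test, for dq in the outer range, is exactly membership in A's tight dr interval.
theorem hex_dist_iff_interval (dq dr rng : Int) (h1 : -rng ≤ dq) (h2 : dq ≤ rng) :
    (|dq| + |dr| + |dq + dr| ≤ 2 * rng) ↔
    (max (-rng) (-dq - rng) ≤ dr ∧ dr ≤ min rng (-dq + rng)) := by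
  rcases abs_cases dq with ⟨e1,_⟩|⟨e1,_⟩ <;> rcases abs_cases dr with ⟨e2,_⟩|⟨e2,_⟩ <;>
    rcases abs_cases (dq+dr) with ⟨e3,_⟩|⟨e3,_⟩ <;> omega

-- Filtering an integer range by an interval predicate yields the clipped range.
theorem filter_pyRange_interval (m M : Int) :
    ∀ (n : Nat) (lo hi : Int), hi - lo ≤ (n : Int) →
    (PySem.List.pyRange lo hi 1).filter (fun x => decide (m ≤ x ∧ x ≤ M)) =
      PySem.List.pyRange (max lo m) (min hi (M + 1)) 1 := by
  intro n
  induction n with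
  | zero =>
    intro lo hi h
    rw [PySem.List.pyRange_one_eq_nil (by omega), PySem.List.pyRange_one_eq_nil (by omega)]
    rfl
  | succ k ih =>
    intro lo hi h
    by_cases hlt : lo < hi
    · rw [PySem.List.pyRange_one_cons hlt, List.filter_cons]
      by_cases hm : m ≤ lo ∧ lo ≤ M
      · simp only [hm, decide_true, and_self, if_true]
        rw [ih (lo + 1) hi (by omega)]
        rw [show max lo m = lo from by omega, show max (lo + 1) m = lo + 1 from by omega,
          ← PySem.List.pyRange_one_cons (by omega)]
      · rcases not_and_or.mp hm with hc | hc
        · simp only [decide_eq_true_eq, hm, if_false]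
          rw [ih (lo + 1) hi (by omega)]
          have e1 : max lo m = m := by omega
          have e2 : max (lo + 1) m = m := by omega
          rw [e1, e2]
        · simp only [decide_eq_true_eq, hm, if_false]
          rw [ih (lo + 1) hi (by omega)]
          rw [PySem.List.pyRange_one_eq_nil (by omega), PySem.List.pyRange_one_eq_nil (by omega)]
    · rw [PySem.List.pyRange_one_eq_nil (by omega), PySem.List.pyRange_one_eq_nil (by omega)]
      rfl

-- set(flatMap) is the row-by-row update fold.
theorem ofList_flatMap_eq_foldl_update {α : Type} {β : Type} [BEq β]
    (l : List α) (g : α → List β) :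
    PySem.Set.ofList (l.flatMap g) = l.foldl (fun s x => PySem.Set.update s (g x)) PySem.Set.empty := by
  have key : ∀ (l : List α) (s : PySem.Set β),
      PySem.Set.update s (l.flatMap g) = l.foldl (fun s x => PySem.Set.update s (g x)) s := by
    intro l
    induction l with
    | nil => intro s; rfl
    | cons x t ih =>
      intro s
      rw [List.flatMap_cons, PySem.Set.update_append, List.foldl_cons, ih]
  rw [← PySem.Set.update_empty, key]

-- ===== VERDICT (by name: the statement is the Claim_ definition above) =====
theorem hexes_in_range_spec : Claim_equal_hexes_in_range := by
  intro q0 r0 rng _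
  unfold Spec_hexes_in_range hexes_in_range hexes_in_range_alt
  simp only [List.map_flatMap, List.map_map]
  rw [ofList_flatMap_eq_foldl_update]
  apply PySem.List.foldl_congr_mem
  intro acc dq hdq
  rw [PySem.List.mem_pyRange_one] at hdq
  have hfilter :
      (PySem.List.pyRange (-rng) (rng + 1) 1).filter
        (fun dr => decide (|dq| + |dr| + |dq + dr| ≤ 2 * rng)) =
      PySem.List.pyRange (max (-rng) (-dq - rng)) (min rng (-dq + rng) + 1) 1 := by
    rw [List.filter_congr (fun x _ => decide_eq_decide.mpr
      (hex_dist_iff_interval dq x rng (by omega) (by omega)))]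
    rw [filter_pyRange_interval _ _ (rng + 1 - (-rng)).toNat (-rng) (rng + 1) (by omega)]
    congr 1
    · omega
    · omega
  rw [hfilter, ← PySem.Set.update_map_eq_foldl_add]
  congr 1
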